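-- pv_equiv track=rewrite | github.com/sy0419/Python | python-basics/level0/065_oddEvenIndex.py | solution
-- ===== SOURCE A (Python) =====
-- def solution(num_list):
--     oddSum = 0
--     evenSum = 0
--     for i, num in enumerate(num_list):
--         if i % 2 == 1:
--             oddSum += num
--         else:
--             evenSum += num
--     if oddSum > evenSum:
--         return oddSum
--     else:
--         return evenSum
-- ===== SOURCE B (Python) =====
-- def solution(num_list):
--     evenSum = sum(num_list[::2])
--     oddSum = sum(num_list[1::2])
--     return max(oddSum, evenSum)
-- ===== Notes on version B (the rewrite author's own statement) =====
-- stated objective: idiomatic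
-- what changed: Replaces the single enumerate loop with an index-parity branch by two strided-slice sums (num_list[::2] and num_list[1::2]) combined with max.
import Mathlib
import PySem

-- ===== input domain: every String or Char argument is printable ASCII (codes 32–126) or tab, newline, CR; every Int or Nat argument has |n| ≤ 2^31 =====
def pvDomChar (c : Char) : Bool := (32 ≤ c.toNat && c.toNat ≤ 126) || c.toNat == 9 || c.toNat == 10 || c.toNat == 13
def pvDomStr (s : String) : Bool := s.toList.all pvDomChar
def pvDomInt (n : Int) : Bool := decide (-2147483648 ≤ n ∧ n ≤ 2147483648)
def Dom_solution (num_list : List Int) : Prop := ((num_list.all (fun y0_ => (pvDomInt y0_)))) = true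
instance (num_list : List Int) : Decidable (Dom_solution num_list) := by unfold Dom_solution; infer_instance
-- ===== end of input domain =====

-- B replaces A's single enumerate loop with an index-parity branch by two strided-slice sums ([::2] and [1::2]) combined with max (idiomatic; same cost).


-- ===== PORT A =====
def solution (num_list : List Int) : Int :=
  let r := (PySem.List.enumerate num_list).foldl
    (fun (acc : Int × Int) (p : Int × Int) =>
      if PySem.Int.mod p.1 2 = 1 then (acc.1 + p.2, acc.2) else (acc.1, acc.2 + p.2))
    (0, 0)
  if r.1 > r.2 then r.1 else r.2

-- ===== PORT B =====
def solution_alt (num_list : List Int) : Int :=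
  let evenSum := ((PySem.List.slice? num_list none none 2).getD []).sum
  let oddSum := ((PySem.List.slice? num_list (some 1) none 2).getD []).sum
  max oddSum evenSum

-- ===== PRECONDITION & SPEC =====
def Spec_solution (num_list : List Int) (out : Int) : Prop := out = solution_alt num_list
instance (num_list : List Int) (out : Int) : Decidable (Spec_solution num_list out) := by unfold Spec_solution; infer_instance

-- ===== CLAIM (what is proved, stated in full; the proofs are below) =====
def Claim_equal_solution : Prop := ∀ (num_list : List Int), Dom_solution num_list → Spec_solution num_list (solution num_list)

-- ===== LEMMAS AND PROOFS =====

/-- the elements of a list at even positions (what the [::2] slice yields). -/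
def stride2 : List Int → List Int
  | [] => []
  | [a] => [a]
  | a :: _ :: t => a :: stride2 t

lemma core_filterMap (xs : List Int) :
    (List.range ((xs.length + 1) / 2)).filterMap (fun k => xs[2 * k]?) = stride2 xs := by
  induction xs using stride2.induct with
  | case1 => simp [stride2]
  | case2 a => simp [stride2]
  | case3 a b t ih =>
    have hlen : (t.length + 2 + 1) / 2 = (t.length + 1) / 2 + 1 := by omega
    simp only [List.length_cons, stride2]
    rw [hlen, List.range_succ_eq_map, List.filterMap_cons]
    simp only [List.filterMap_map, Function.comp_def, Nat.mul_succ]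
    have hidx : ∀ k : Nat, (a :: b :: t)[2 * k + 2]? = t[2 * k]? := by
      intro k
      rw [show 2 * k + 2 = (2 * k) + 1 + 1 by omega]
      simp
    simp [hidx, ih]

lemma slice2_even (xs : List Int) :
    PySem.List.slice? xs none none 2 = some (stride2 xs) := by
  simp only [PySem.List.slice?, PySem.List.sliceIndices]
  norm_num
  have hcount : (if 0 < xs.length then ((((xs.length:Int)) + 2 - 1) / 2).toNat else 0)
      = (xs.length + 1) / 2 := by split <;> omega
  have hidx : (fun (k : Nat) => xs[((2:Int) * (k:Int)).toNat]?) = fun k => xs[2 * k]? := by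
    funext k
    rw [show ((2:Int) * (k:Int)).toNat = 2 * k by omega]
  rw [hcount, hidx, core_filterMap]

lemma slice2_odd (xs : List Int) :
    PySem.List.slice? xs (some 1) none 2 = some (stride2 xs.tail) := by
  cases xs with
  | nil => decide
  | cons a t =>
    simp only [PySem.List.slice?, PySem.List.sliceIndices]
    norm_num
    have hcount : (if 0 < t.length then ((((t.length:Int)) + 2 - 1) / 2).toNat else 0)
        = (t.length + 1) / 2 := by split <;> omega
    have hidx : (fun (k : Nat) => (a :: t)[((1:Int) + 2 * (k:Int)).toNat]?) = fun k => t[2 * k]? := by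
      funext k
      rw [show ((1:Int) + 2 * (k:Int)).toNat = 2 * k + 1 by omega]
      simp
    rw [hcount, hidx, core_filterMap]

lemma stride2_cons (b : Int) (t : List Int) : stride2 (b :: t) = b :: stride2 t.tail := by
  cases t <;> simp [stride2]

lemma mod2_facts (s : Int) (hs : PySem.Int.mod s 2 = 0) :
    PySem.Int.mod s 2 ≠ 1 ∧ PySem.Int.mod (s + 1) 2 = 1 ∧ PySem.Int.mod (s + 2) 2 = 0 := by
  simp only [PySem.Int.mod, Int.fmod_eq_emod] at *
  omega

lemma loop_eq (xs : List Int) : ∀ (s o e : Int), PySem.Int.mod s 2 = 0 →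
    (PySem.List.enumerate xs s).foldl
      (fun (acc : Int × Int) (p : Int × Int) =>
        if PySem.Int.mod p.1 2 = 1 then (acc.1 + p.2, acc.2) else (acc.1, acc.2 + p.2))
      (o, e)
    = (o + (stride2 xs.tail).sum, e + (stride2 xs).sum) := by
  induction xs using stride2.induct with
  | case1 => intro s o e _; simp [PySem.List.enumerate_nil, stride2]
  | case2 a =>
    intro s o e hs
    obtain ⟨h1, _, _⟩ := mod2_facts s hs
    simp only [PySem.List.enumerate_cons, PySem.List.enumerate_nil, List.foldl_cons,
      List.foldl_nil, if_neg h1]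
    simp [stride2]
  | case3 a b t ih =>
    intro s o e hs
    obtain ⟨h1, h2, h3⟩ := mod2_facts s hs
    simp only [PySem.List.enumerate_cons, List.foldl_cons, h1, h2, if_true, if_false]
    rw [show s + 1 + 1 = s + 2 by ring] at *
    rw [ih (s + 2) (o + b) (e + a) h3]
    simp only [stride2, List.tail_cons, stride2_cons, List.sum_cons]
    exact Prod.ext (by ring) (by ring)

theorem solution_spec : Claim_equal_solution := by
  intro xs _
  unfold Spec_solution solution solution_alt
  rw [slice2_even, slice2_odd]
  simp only [Option.getD_some]
  rw [loop_eq xs 0 0 0 (by decide)]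
  simp only [zero_add]
  omega
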